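-- pv_equiv track=rewrite | github.com/sierra-95/alx-frontend-for-fun | markdown2html.py | validate_em
-- ===== SOURCE A (Python) =====
-- def validate_em(line):
--     """
--     Validate if the line has italic text.
--     """
--     index = line.find("__")
--     result = ""
--
--     if index != -1:
--         result += line[:index] + "<em>"
--         new_str = line[index + 2:]
--         idx = new_str.find("__")
--         if idx != -1:
--             if idx + 1 == len(new_str):
--                 result += new_str[:idx] + "</em>\n"
--             else:
--                 result += new_str[:idx] + "</em>"
--                 result += validate_em(new_str[idx + 2:])
--
--         else:
--             result = line
--
--     else:
--         result = line
--
--     return result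
-- ===== SOURCE B (Python) =====
-- def validate_em(line):
--     """Iterative single pass with an accumulator instead of recursion."""
--     result = ""
--     cur = line
--     while True:
--         i = cur.find("__")
--         if i == -1:
--             return result + cur
--         j = cur.find("__", i + 2)
--         if j == -1:
--             return result + cur
--         result += cur[:i] + "<em>" + cur[i + 2:j] + "</em>"
--         cur = cur[j + 2:]
-- ===== Notes on version B (the rewrite author's own statement) =====
-- stated objective: simpler
-- what changed: Replaces A's recursion (which rebuilds the result by nested string concatenation of recursive calls and carries a dead newline branch) with a single iterative loop keeping a result accumulator and the unprocessed tail, with one unified fallback appending the unprocessed tail to the accumulated result for both unmatched-marker cases.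
import Mathlib
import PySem

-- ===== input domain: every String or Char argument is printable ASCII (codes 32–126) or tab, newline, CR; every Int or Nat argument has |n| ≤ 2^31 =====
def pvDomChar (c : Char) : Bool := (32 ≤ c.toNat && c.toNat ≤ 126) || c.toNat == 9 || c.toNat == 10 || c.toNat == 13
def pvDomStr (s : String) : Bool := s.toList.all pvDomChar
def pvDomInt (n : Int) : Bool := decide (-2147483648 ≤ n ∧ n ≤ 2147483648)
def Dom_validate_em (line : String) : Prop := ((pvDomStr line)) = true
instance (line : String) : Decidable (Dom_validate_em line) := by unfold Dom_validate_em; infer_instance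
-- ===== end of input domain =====

-- B replaces A's recursion by one iterative accumulator loop with a single unified fallback (objective: simpler).
-- Both ports carry a fuel argument (line.length + 1, always sufficient: each round consumes ≥ 4 characters) as a totality guard only.

-- ===== PORT A =====
-- Port of A's recursion, on the character list of the line (str.find / slices via PySem.Chars).
def validateEmRec : Nat → List Char → List Char
  | 0, line => line
  | fuel + 1, line =>
    let index := PySem.Chars.find line "__".toList
    if index ≠ -1 then
      let result := PySem.Chars.slice line none (some index) ++ "<em>".toList
      let new_str := PySem.Chars.slice line (some (index + 2)) none
      let idx := PySem.Chars.find new_str "__".toList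
      if idx ≠ -1 then
        if idx + 1 = (new_str.length : Int) then
          result ++ PySem.Chars.slice new_str none (some idx) ++ "</em>\n".toList
        else
          result ++ PySem.Chars.slice new_str none (some idx) ++ "</em>".toList
            ++ validateEmRec fuel (PySem.Chars.slice new_str (some (idx + 2)) none)
      else line
    else line

def validate_em (line : String) : String :=
  String.ofList (validateEmRec (line.toList.length + 1) line.toList)

-- ===== PORT B =====
-- Port of B's while-loop: result accumulator + remaining tail.
def validateEmLoop : Nat → List Char → List Char → List Char
  | 0, result, cur => result ++ cur
  | fuel + 1, result, cur =>
    let i := PySem.Chars.find cur "__".toList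
    if i = -1 then result ++ cur
    else
      let j := PySem.Chars.findFrom cur "__".toList (i + 2)
      if j = -1 then result ++ cur
      else
        validateEmLoop fuel
          (result ++ PySem.Chars.slice cur none (some i) ++ "<em>".toList
            ++ PySem.Chars.slice cur (some (i + 2)) (some j) ++ "</em>".toList)
          (PySem.Chars.slice cur (some (j + 2)) none)

def validate_em_alt (line : String) : String :=
  String.ofList (validateEmLoop (line.toList.length + 1) [] line.toList)

-- ===== PRECONDITION & SPEC =====
def Spec_validate_em (line : String) (out : String) : Prop := out = validate_em_alt line
instance (line : String) (out : String) : Decidable (Spec_validate_em line out) := by unfold Spec_validate_em; infer_instance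

-- ===== CLAIM (what is proved, stated in full; the proofs are below) =====
def Claim_equal_validate_em : Prop := ∀ (line : String), Dom_validate_em line → Spec_validate_em line (validate_em line)

-- ===== LEMMAS AND PROOFS =====

-- Facts about the first occurrence of "__".
lemma pvFindFacts (cur : List Char) (h : ¬ PySem.Chars.find cur "__".toList = -1) :
    0 ≤ PySem.Chars.find cur "__".toList ∧
    (PySem.Chars.find cur "__".toList).toNat + 2 ≤ cur.length := by
  have h1 := PySem.Chars.neg_one_le_find cur "__".toList
  have h0 : 0 ≤ PySem.Chars.find cur "__".toList := by omega
  have hpre := (PySem.Chars.find_spec (s := cur) (sub := "__".toList) h0).1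
  have hL := hpre.length_le
  rw [List.length_drop] at hL
  have h2 : ("__".toList).length = 2 := rfl
  rw [h2] at hL
  exact ⟨h0, by omega⟩

-- find-from-k decomposed into find on the dropped tail.
lemma pvFindFromFacts (cur : List Char) (k : Nat) (hk : k ≤ cur.length)
    (h : ¬ PySem.Chars.findFrom cur "__".toList (k : Int) = -1) :
    PySem.Chars.findFrom cur "__".toList (k : Int)
      = (k : Int) + PySem.Chars.find (cur.drop k) "__".toList
    ∧ 0 ≤ PySem.Chars.find (cur.drop k) "__".toList
    ∧ k + (PySem.Chars.find (cur.drop k) "__".toList).toNat + 2 ≤ cur.length := by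
  rw [PySem.Chars.findFrom_natCast cur _ k hk] at h ⊢
  by_cases hd : PySem.Chars.find (cur.drop k) "__".toList = -1
  · rw [if_pos hd] at h
    exact absurd rfl h
  · obtain ⟨h0, hL⟩ := pvFindFacts (cur.drop k) hd
    rw [List.length_drop] at hL
    exact ⟨if_neg hd, h0, by omega⟩

lemma validateEmLoop_eq_rec (n : Nat) :
    ∀ (cur : List Char), cur.length < n → ∀ (acc : List Char),
      validateEmLoop n acc cur = acc ++ validateEmRec n cur := by
  induction n with
  | zero => intro cur h; omega
  | succ n ih =>
    intro cur hlen acc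
    rw [validateEmLoop, validateEmRec]
    simp only []
    by_cases hi : PySem.Chars.find cur "__".toList = -1
    · rw [if_pos hi, if_neg (show ¬ PySem.Chars.find cur "__".toList ≠ -1 from fun h => h hi)]
    · obtain ⟨h0, hlen1⟩ := pvFindFacts cur hi
      have hcast : PySem.Chars.find cur "__".toList + 2
          = (((PySem.Chars.find cur "__".toList).toNat + 2 : Nat) : Int) := by omega
      have hns : PySem.Chars.slice cur (some (PySem.Chars.find cur "__".toList + 2)) none
          = cur.drop ((PySem.Chars.find cur "__".toList).toNat + 2) := by
        simp only [PySem.Chars.slice_eq_listSlice]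
        rw [hcast, PySem.List.slice_from_natCast]
      rw [if_neg hi, if_pos (show PySem.Chars.find cur "__".toList ≠ -1 from hi)]
      try simp only []
      rw [hns, hcast]
      by_cases hg : PySem.Chars.find
          (cur.drop ((PySem.Chars.find cur "__".toList).toNat + 2)) "__".toList = -1
      · -- no closing marker: both sides fall back to the untouched line
        rw [if_neg (show ¬ _ ≠ -1 from fun h => h hg),
          PySem.Chars.findFrom_natCast cur _ _ hlen1, if_pos hg, if_pos rfl]
      · have hg1 := PySem.Chars.neg_one_le_find
          (cur.drop ((PySem.Chars.find cur "__".toList).toNat + 2)) "__".toList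
        have hjne : ¬ PySem.Chars.findFrom cur "__".toList
            (((PySem.Chars.find cur "__".toList).toNat + 2 : Nat) : Int) = -1 := by
          rw [PySem.Chars.findFrom_natCast cur _ _ hlen1, if_neg hg]
          omega
        obtain ⟨heq, hg0, hglen⟩ := pvFindFromFacts cur _ hlen1 hjne
        rw [heq, if_neg (show ¬ _ = (-1 : Int) from by omega), if_pos hg]
        try simp only []
        have hdead : ¬ (PySem.Chars.find
            (cur.drop ((PySem.Chars.find cur "__".toList).toNat + 2)) "__".toList + 1
            = ((cur.drop ((PySem.Chars.find cur "__".toList).toNat + 2)).length : Int)) := by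
          rw [List.length_drop]
          omega
        rw [if_neg hdead]
        -- normalise the four slices to drop/take form
        have hA1 : PySem.Chars.slice
            (cur.drop ((PySem.Chars.find cur "__".toList).toNat + 2)) none
            (some (PySem.Chars.find
              (cur.drop ((PySem.Chars.find cur "__".toList).toNat + 2)) "__".toList))
            = (cur.drop ((PySem.Chars.find cur "__".toList).toNat + 2)).take
              (PySem.Chars.find
                (cur.drop ((PySem.Chars.find cur "__".toList).toNat + 2)) "__".toList).toNat := by
          simp only [PySem.Chars.slice_eq_listSlice]
          rw [PySem.List.slice_to _ hg0]
        have hA2 : PySem.Chars.slice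
            (cur.drop ((PySem.Chars.find cur "__".toList).toNat + 2))
            (some (PySem.Chars.find
              (cur.drop ((PySem.Chars.find cur "__".toList).toNat + 2)) "__".toList + 2)) none
            = cur.drop ((PySem.Chars.find cur "__".toList).toNat + 2
                + ((PySem.Chars.find
                  (cur.drop ((PySem.Chars.find cur "__".toList).toNat + 2)) "__".toList).toNat + 2)) := by
          simp only [PySem.Chars.slice_eq_listSlice]
          rw [show PySem.Chars.find
              (cur.drop ((PySem.Chars.find cur "__".toList).toNat + 2)) "__".toList + 2
              = (((PySem.Chars.find
                (cur.drop ((PySem.Chars.find cur "__".toList).toNat + 2)) "__".toList).toNat + 2 : Nat) : Int)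
            from by omega, PySem.List.slice_from_natCast, List.drop_drop]
        have hB1 : PySem.Chars.slice cur
            (some (((PySem.Chars.find cur "__".toList).toNat + 2 : Nat) : Int))
            (some ((((PySem.Chars.find cur "__".toList).toNat + 2 : Nat) : Int)
              + PySem.Chars.find
                (cur.drop ((PySem.Chars.find cur "__".toList).toNat + 2)) "__".toList))
            = (cur.drop ((PySem.Chars.find cur "__".toList).toNat + 2)).take
              (PySem.Chars.find
                (cur.drop ((PySem.Chars.find cur "__".toList).toNat + 2)) "__".toList).toNat := by
          simp only [PySem.Chars.slice_eq_listSlice]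
          rw [show (((PySem.Chars.find cur "__".toList).toNat + 2 : Nat) : Int)
              + PySem.Chars.find
                (cur.drop ((PySem.Chars.find cur "__".toList).toNat + 2)) "__".toList
              = ((((PySem.Chars.find cur "__".toList).toNat + 2)
                + (PySem.Chars.find
                  (cur.drop ((PySem.Chars.find cur "__".toList).toNat + 2)) "__".toList).toNat : Nat) : Int)
            from by omega, PySem.List.slice_natCast]
          congr 1
          omega
        have hB2 : PySem.Chars.slice cur
            (some ((((PySem.Chars.find cur "__".toList).toNat + 2 : Nat) : Int)
              + PySem.Chars.find
                (cur.drop ((PySem.Chars.find cur "__".toList).toNat + 2)) "__".toList + 2)) none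
            = cur.drop ((PySem.Chars.find cur "__".toList).toNat + 2
                + ((PySem.Chars.find
                  (cur.drop ((PySem.Chars.find cur "__".toList).toNat + 2)) "__".toList).toNat + 2)) := by
          simp only [PySem.Chars.slice_eq_listSlice]
          rw [show (((PySem.Chars.find cur "__".toList).toNat + 2 : Nat) : Int)
              + PySem.Chars.find
                (cur.drop ((PySem.Chars.find cur "__".toList).toNat + 2)) "__".toList + 2
              = ((((PySem.Chars.find cur "__".toList).toNat + 2)
                + ((PySem.Chars.find
                  (cur.drop ((PySem.Chars.find cur "__".toList).toNat + 2)) "__".toList).toNat + 2) : Nat) : Int)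
            from by omega, PySem.List.slice_from_natCast]
        rw [hA1, hA2, hB1, hB2]
        rw [ih (cur.drop ((PySem.Chars.find cur "__".toList).toNat + 2
            + ((PySem.Chars.find
              (cur.drop ((PySem.Chars.find cur "__".toList).toNat + 2)) "__".toList).toNat + 2)))
          (by rw [List.length_drop]; omega)]
        simp [List.append_assoc]

-- ===== VERDICT (by name: the statement is the Claim_ definition above) =====
theorem validate_em_spec : Claim_equal_validate_em := by
  intro line _
  unfold Spec_validate_em
  unfold validate_em validate_em_alt
  rw [validateEmLoop_eq_rec (line.toList.length + 1) line.toList (by omega) []]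
  simp
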